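-- pv_equiv track=rewrite | github.com/Charisma-Ricarte/Global-Energy-Access-Analyzer | frontend.py | is_aggregate_name
-- ===== SOURCE A (Python) =====
-- def is_aggregate_name(name):
--     if not name:
--         return False
--     n = str(name).strip().lower()
--     bad_keywords = [
--         "world", "income", "region", "asia", "africa", "americ", "europe",
--         "middle", "low", "high", "ida", "ibrd", "blend", "small states",
--         "fragile", "pre-demographic", "post-demographic", "demographic",
--         "least developed", "heavily indebted", "oecd", "e&c", "europe & central asia",
--         "caribbean", "arab world"
--     ]
--     return any(k in n for k in bad_keywords)
-- ===== SOURCE B (Python) =====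
-- # First-character bucket index: keywords are pre-bucketed by their first letter,
-- # and the name is scanned once left-to-right; at each position only the tails of
-- # the bucket for the current character are tested.
-- _BUCKETS = {
--     "w": ["orld"],
--     "i": ["ncome", "da", "brd"],
--     "r": ["egion"],
--     "a": ["sia", "frica", "meric", "rab world"],
--     "e": ["urope", "&c", "urope & central asia"],
--     "m": ["iddle"],
--     "l": ["ow", "east developed"],
--     "h": ["igh", "eavily indebted"],
--     "b": ["lend"],
--     "s": ["mall states"],
--     "f": ["ragile"],
--     "p": ["re-demographic", "ost-demographic"],
--     "d": ["emographic"],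
--     "o": ["ecd"],
--     "c": ["aribbean"],
-- }
--
--
-- def is_aggregate_name(name):
--     if not name:
--         return False
--     n = str(name).strip().lower()
--     for i, ch in enumerate(n):
--         for tail in _BUCKETS.get(ch, ()):
--             if n.startswith(tail, i + 1):
--                 return True
--     return False
-- ===== Notes on version B (the rewrite author's own statement) =====
-- stated objective: alternative
-- what changed: Replaced the keyword-major any(k in n) loop (one full substring-search pass per keyword) by a precomputed first-letter bucket index (dict from first character to keyword tails) driving a single left-to-right scan of the name, so at each position only the tails bucketed under the current character are tested and the per-keyword containment passes disappear.
import Mathlib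
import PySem

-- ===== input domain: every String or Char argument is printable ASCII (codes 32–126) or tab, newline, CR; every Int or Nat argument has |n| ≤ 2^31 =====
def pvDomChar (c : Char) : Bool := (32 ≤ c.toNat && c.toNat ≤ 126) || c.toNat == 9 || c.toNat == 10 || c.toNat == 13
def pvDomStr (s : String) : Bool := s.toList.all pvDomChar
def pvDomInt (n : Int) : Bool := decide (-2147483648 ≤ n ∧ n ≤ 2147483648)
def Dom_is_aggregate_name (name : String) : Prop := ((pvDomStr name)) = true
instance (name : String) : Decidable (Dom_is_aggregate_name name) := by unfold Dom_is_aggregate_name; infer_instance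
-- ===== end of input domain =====

-- ===== PORT A =====
-- B replaces the per-keyword containment loop by a first-letter bucket index and one
-- left-to-right scan (alternative decomposition; same observable value).
def pvBadKeywords : List String :=
  ["world", "income", "region", "asia", "africa", "americ", "europe",
   "middle", "low", "high", "ida", "ibrd", "blend", "small states",
   "fragile", "pre-demographic", "post-demographic", "demographic",
   "least developed", "heavily indebted", "oecd", "e&c", "europe & central asia",
   "caribbean", "arab world"]

def is_aggregate_name (name : String) : Bool :=
  if name = "" then false
  else
    let n := PySem.Str.lower (PySem.Str.strip name)
    pvBadKeywords.any (fun k => PySem.Str.isIn k n)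

-- ===== PORT B =====
-- the _BUCKETS literal of Source B: first character ↦ list of keyword tails
def pvTails (c : Char) : List String :=
  if c = 'w' then ["orld"]
  else if c = 'i' then ["ncome", "da", "brd"]
  else if c = 'r' then ["egion"]
  else if c = 'a' then ["sia", "frica", "meric", "rab world"]
  else if c = 'e' then ["urope", "&c", "urope & central asia"]
  else if c = 'm' then ["iddle"]
  else if c = 'l' then ["ow", "east developed"]
  else if c = 'h' then ["igh", "eavily indebted"]
  else if c = 'b' then ["lend"]
  else if c = 's' then ["mall states"]
  else if c = 'f' then ["ragile"]
  else if c = 'p' then ["re-demographic", "ost-demographic"]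
  else if c = 'd' then ["emographic"]
  else if c = 'o' then ["ecd"]
  else if c = 'c' then ["aribbean"]
  else []

-- the enumerate loop of Source B: n.startswith(tail, i+1) at position i with n[i] = c
-- is exact as 'startswith rest tail' on the remaining characters
def pvScan : List Char → Bool
  | [] => false
  | c :: rest =>
    if (pvTails c).any (fun t => PySem.Chars.startswith rest t.toList) then true
    else pvScan rest

def is_aggregate_name_alt (name : String) : Bool :=
  if name = "" then false
  else pvScan (PySem.Str.lower (PySem.Str.strip name)).toList

-- ===== PRECONDITION & SPEC =====
def Spec_is_aggregate_name (name : String) (out : Bool) : Prop := out = is_aggregate_name_alt name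
instance (name : String) (out : Bool) : Decidable (Spec_is_aggregate_name name out) := by unfold Spec_is_aggregate_name; infer_instance

-- ===== CLAIM (what is proved, stated in full; the proofs are below) =====
def Claim_equal_is_aggregate_name : Prop := ∀ (name : String), Dom_is_aggregate_name name → Spec_is_aggregate_name name (is_aggregate_name name)

-- ===== LEMMAS AND PROOFS =====

-- expand the keyword list once: membership-prefix as an explicit 25-way disjunction
theorem pv_kw_iff (l : List Char) :
    (∃ k ∈ pvBadKeywords, k.toList <+: l) ↔
      ('w' :: "orld".toList <+: l ∨ 'i' :: "ncome".toList <+: l ∨ 'r' :: "egion".toList <+: l ∨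
       'a' :: "sia".toList <+: l ∨ 'a' :: "frica".toList <+: l ∨ 'a' :: "meric".toList <+: l ∨
       'e' :: "urope".toList <+: l ∨ 'm' :: "iddle".toList <+: l ∨ 'l' :: "ow".toList <+: l ∨
       'h' :: "igh".toList <+: l ∨ 'i' :: "da".toList <+: l ∨ 'i' :: "brd".toList <+: l ∨
       'b' :: "lend".toList <+: l ∨ 's' :: "mall states".toList <+: l ∨ 'f' :: "ragile".toList <+: l ∨
       'p' :: "re-demographic".toList <+: l ∨ 'p' :: "ost-demographic".toList <+: l ∨
       'd' :: "emographic".toList <+: l ∨ 'l' :: "east developed".toList <+: l ∨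
       'h' :: "eavily indebted".toList <+: l ∨ 'o' :: "ecd".toList <+: l ∨ 'e' :: "&c".toList <+: l ∨
       'e' :: "urope & central asia".toList <+: l ∨ 'c' :: "aribbean".toList <+: l ∨
       'a' :: "rab world".toList <+: l) := by
  simp [pvBadKeywords]

-- bucket correctness: a hit at the head of c :: rest is exactly a keyword prefix there
theorem pv_hit_iff (c : Char) (rest : List Char) :
    ((pvTails c).any fun t => PySem.Chars.startswith rest t.toList) = true ↔
      ∃ k ∈ pvBadKeywords, k.toList <+: c :: rest := by
  rw [pv_kw_iff]
  simp only [List.cons_prefix_cons]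
  by_cases h1 : c = 'w'
  · simp [pvTails, h1, PySem.Chars.startswith_iff]
  by_cases h2 : c = 'i'
  · simp [pvTails, h2, PySem.Chars.startswith_iff]
  by_cases h3 : c = 'r'
  · simp [pvTails, h3, PySem.Chars.startswith_iff]
  by_cases h4 : c = 'a'
  · simp [pvTails, h4, PySem.Chars.startswith_iff]
  by_cases h5 : c = 'e'
  · simp [pvTails, h5, PySem.Chars.startswith_iff]
  by_cases h6 : c = 'm'
  · simp [pvTails, h6, PySem.Chars.startswith_iff]
  by_cases h7 : c = 'l'
  · simp [pvTails, h7, PySem.Chars.startswith_iff]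
  by_cases h8 : c = 'h'
  · simp [pvTails, h8, PySem.Chars.startswith_iff]
  by_cases h9 : c = 'b'
  · simp [pvTails, h9, PySem.Chars.startswith_iff]
  by_cases h10 : c = 's'
  · simp [pvTails, h10, PySem.Chars.startswith_iff]
  by_cases h11 : c = 'f'
  · simp [pvTails, h11, PySem.Chars.startswith_iff]
  by_cases h12 : c = 'p'
  · simp [pvTails, h12, PySem.Chars.startswith_iff]
  by_cases h13 : c = 'd'
  · simp [pvTails, h13, PySem.Chars.startswith_iff]
  by_cases h14 : c = 'o'
  · simp [pvTails, h14, PySem.Chars.startswith_iff]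
  by_cases h15 : c = 'c'
  · simp [pvTails, h15, PySem.Chars.startswith_iff]
  simp [pvTails, h1, h2, h3, h4, h5, h6, h7, h8, h9, h10, h11, h12, h13, h14, h15, Ne.symm h1, Ne.symm h2, Ne.symm h3, Ne.symm h4, Ne.symm h5, Ne.symm h6, Ne.symm h7, Ne.symm h8, Ne.symm h9, Ne.symm h10, Ne.symm h11, Ne.symm h12, Ne.symm h13, Ne.symm h14, Ne.symm h15]

-- the scan finds exactly the keyword infixes
theorem pv_scan_iff (l : List Char) :
    pvScan l = true ↔ ∃ k ∈ pvBadKeywords, k.toList <:+: l := by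
  induction l with
  | nil => simp [pvScan, List.infix_nil, pvBadKeywords]
  | cons c rest ih =>
    by_cases hb : ((pvTails c).any fun t => PySem.Chars.startswith rest t.toList) = true
    · simp only [pvScan, hb, if_true, true_iff]
      obtain ⟨k, hk, hp⟩ := (pv_hit_iff c rest).mp hb
      exact ⟨k, hk, hp.isInfix⟩
    · simp only [pvScan, hb, if_false, Bool.false_eq_true, ih]
      constructor
      · rintro ⟨k, hk, hinf⟩
        exact ⟨k, hk, List.infix_cons_iff.mpr (Or.inr hinf)⟩
      · rintro ⟨k, hk, hinf⟩
        rcases List.infix_cons_iff.mp hinf with hpre | hinf'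
        · exact absurd ((pv_hit_iff c rest).mpr ⟨k, hk, hpre⟩) hb
        · exact ⟨k, hk, hinf'⟩

-- ===== VERDICT (by name: the statement is the Claim_ definition above) =====
theorem is_aggregate_name_spec : Claim_equal_is_aggregate_name := by
  intro name _
  unfold Spec_is_aggregate_name is_aggregate_name is_aggregate_name_alt
  by_cases h0 : name = ""
  · simp [h0]
  · simp only [h0, ite_false]
    apply Bool.eq_iff_iff.mpr
    rw [pv_scan_iff]
    simp [PySem.Str.isIn_eq, PySem.Chars.isIn_iff_infix]
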